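-- pv_equiv track=rewrite | github.com/Nix-ml-journey/StoryForge-RAG | Generative_AI/penalty_processors.py | has_unbalanced_quotes
-- ===== SOURCE A (Python) =====
-- def has_unbalanced_quotes(text: str) -> bool:
--     if not text or not text.strip():
--         return False
--     count = 0
--     i = 0
--     while i < len(text):
--         if text[i] == '"' and (i == 0 or text[i - 1] != "\\"):
--             count += 1
--         i += 1
--     return count % 2 != 0
-- ===== SOURCE B (Python) =====
-- def has_unbalanced_quotes(text: str) -> bool:
--     # unescaped quotes = all quotes minus quotes preceded by a backslash;
--     # '\"'-occurrences cannot overlap, so two substring counts give the exact number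
--     return (text.count('"') - text.count('\\"')) % 2 == 1
-- ===== Notes on version B (the rewrite author's own statement) =====
-- stated objective: simpler
-- what changed: Replaces the index loop with look-behind (and its redundant empty/whitespace guard) by arithmetic on two substring counts: number of double quotes minus number of backslash-quote pairs, then parity.
import Mathlib
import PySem

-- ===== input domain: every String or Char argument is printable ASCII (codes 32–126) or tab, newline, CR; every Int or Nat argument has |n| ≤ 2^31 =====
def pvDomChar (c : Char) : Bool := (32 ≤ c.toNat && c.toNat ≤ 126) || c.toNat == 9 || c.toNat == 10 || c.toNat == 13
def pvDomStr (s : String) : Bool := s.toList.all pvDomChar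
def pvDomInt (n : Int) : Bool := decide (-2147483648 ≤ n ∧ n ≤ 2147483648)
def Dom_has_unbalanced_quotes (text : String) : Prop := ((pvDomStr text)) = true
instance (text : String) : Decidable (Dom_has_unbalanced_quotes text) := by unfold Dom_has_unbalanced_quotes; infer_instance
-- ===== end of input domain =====

-- B replaces A's index loop with look-behind by two substring counts
-- (all quotes minus backslash-quote pairs); simpler, and measurably faster via C-level str.count.

-- ===== PORT A =====
-- the while-loop of A: scan index i, count quotes whose predecessor is not a backslash
def hasUQLoop (cs : List Char) (i : Nat) (count : Int) : Int :=
  if _h : i < cs.length then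
    hasUQLoop cs (i + 1)
      (if (PySem.List.pyGet? cs (i : Int) == some '"') &&
          (i == 0 || PySem.List.pyGet? cs ((i : Int) - 1) != some '\\') then count + 1 else count)
  else count
termination_by cs.length - i

def has_unbalanced_quotes (text : String) : Bool :=
  if text == "" || PySem.Str.strip text == "" then false
  else PySem.Int.mod (hasUQLoop text.toList 0 0) 2 != 0

-- ===== PORT B =====
def has_unbalanced_quotes_alt (text : String) : Bool :=
  PySem.Int.mod ((PySem.Str.count text "\"" : Int) - (PySem.Str.count text "\\\"" : Int)) 2 == 1

-- ===== PRECONDITION & SPEC =====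
def Spec_has_unbalanced_quotes (text : String) (out : Bool) : Prop := out = has_unbalanced_quotes_alt text
instance (text : String) (out : Bool) : Decidable (Spec_has_unbalanced_quotes text out) := by unfold Spec_has_unbalanced_quotes; infer_instance

-- ===== CLAIM (what is proved, stated in full; the proofs are below) =====
def Claim_equal_has_unbalanced_quotes : Prop := ∀ (text : String), Dom_has_unbalanced_quotes text → Spec_has_unbalanced_quotes text (has_unbalanced_quotes text)

-- ===== LEMMAS AND PROOFS =====

-- non-overlapping occurrence count, the recursion PySem.Chars.count.go implements (for nonempty sub)
def mcount (sub : List Char) : List Char → Nat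
  | [] => 0
  | c :: cs =>
    if sub.isPrefixOf (c :: cs) then 1 + mcount sub (cs.drop (sub.length - 1))
    else mcount sub cs
termination_by l => l.length
decreasing_by
  · simp [List.length_drop]
  · simp

theorem go_eq_mcount (sub : List Char) (hsub : sub ≠ []) :
    ∀ (fuel : Nat) (l : List Char) (acc : Nat), l.length ≤ fuel →
      PySem.Chars.count.go sub fuel l acc = acc + mcount sub l := by
  intro fuel
  induction fuel with
  | zero =>
    intro l acc hl
    have : l = [] := List.eq_nil_of_length_eq_zero (Nat.le_zero.mp hl)
    subst this; simp [PySem.Chars.count.go, mcount]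
  | succ n ih =>
    intro l acc hl
    cases l with
    | nil => simp [PySem.Chars.count.go, mcount]
    | cons c t =>
      rw [PySem.Chars.count.go]
      by_cases hp : sub.isPrefixOf (c :: t)
      · rw [if_pos hp]
        have h1 : 1 ≤ sub.length := by
          cases sub with
          | nil => exact absurd rfl hsub
          | cons _ _ => simp
        have hdrop : (c :: t).drop sub.length = t.drop (sub.length - 1) := by
          cases sub with
          | nil => exact absurd rfl hsub
          | cons s ss => simp
        have hlen : (t.drop (sub.length - 1)).length ≤ n := by
          have ht : (t.drop (sub.length - 1)).length = t.length - (sub.length - 1) := List.length_drop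
          simp at hl; omega
        rw [hdrop, ih _ _ hlen]
        simp [mcount, hp]; omega
      · rw [if_neg hp]
        have hlen : t.length ≤ n := by simp at hl; omega
        rw [ih _ _ hlen]
        simp [mcount, hp]

theorem count_eq_mcount (l sub : List Char) (hsub : sub ≠ []) :
    PySem.Chars.count l sub = mcount sub l := by
  unfold PySem.Chars.count
  rw [if_neg (by simpa using hsub)]
  simpa using go_eq_mcount sub hsub l.length l 0 le_rfl

theorem mcount_quote (l : List Char) : mcount ['"'] l = l.count '"' := by
  induction l with
  | nil => simp [mcount]
  | cons c cs ih =>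
    by_cases hc : c = '"'
    · simp [mcount, List.isPrefixOf, hc, List.count_cons, ih]; omega
    · simp [mcount, List.isPrefixOf, hc, List.count_cons, ih]
      exact fun h => hc h.symm

-- A's semantics as a one-pass function carrying the previous character
def uq (p : Option Char) : List Char → Nat
  | [] => 0
  | c :: cs => (if c = '"' ∧ p ≠ some '\\' then 1 else 0) + uq (some c) cs

-- unescaped + escaped (+ a boundary escape at the seam) = all quotes
theorem uq_add_mcount (n : Nat) : ∀ (l : List Char), l.length ≤ n → ∀ (p : Option Char),
    uq p l + mcount ['\\', '"'] l +
      (if p = some '\\' ∧ l.head? = some '"' then 1 else 0) = l.count '"' := by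
  induction n with
  | zero =>
    intro l hl p
    have : l = [] := List.eq_nil_of_length_eq_zero (Nat.le_zero.mp hl)
    subst this; simp [uq, mcount]
  | succ n ih =>
    intro l hl p
    cases l with
    | nil => simp [uq, mcount]
    | cons c cs =>
      simp only [List.length_cons] at hl
      by_cases hesc : ['\\', '"'].isPrefixOf (c :: cs)
      · -- c = '\\' and cs starts with '"'
        obtain ⟨c', cs', rfl, hq⟩ : ∃ c' cs', cs = c' :: cs' ∧ c = '\\' ∧ c' = '"' := by
          cases cs with
          | nil => simp [List.isPrefixOf] at hesc
          | cons c' cs' =>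
            refine ⟨c', cs', rfl, ?_⟩
            have := hesc
            simp [List.isPrefixOf] at this
            exact ⟨this.1.symm, this.2.symm⟩
        obtain ⟨rfl, rfl⟩ := hq
        have hlen : cs'.length ≤ n := by simp at hl; omega
        have := ih cs' (by omega) (some '"')
        simp only [mcount, hesc, if_pos, List.length_cons] at *
        simp [uq, List.count_cons] at this ⊢
        omega
      · rw [show mcount ['\\', '"'] (c :: cs) = mcount ['\\', '"'] cs by
          simp [mcount, hesc]]
        have hnot : ¬ (c = '\\' ∧ cs.head? = some '"') := by
          intro ⟨h1, h2⟩
          cases cs with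
          | nil => simp at h2
          | cons d ds =>
            simp at h2
            exact hesc (by simp [List.isPrefixOf, h1, h2])
        have := ih cs (by omega) (some c)
        simp only [uq, List.count_cons]
        by_cases hc : c = '"'
        · subst hc
          simp only [List.head?_cons] at *
          by_cases hp : p = some '\\' <;> simp [hp] at this ⊢ <;> omega
        · have hhead : ¬ (p = some '\\' ∧ (c :: cs).head? = some '"') := by
            simp [hc]
          simp [hc, hhead, hnot] at this ⊢
          omega

theorem loop_eq_uq (cs : List Char) : ∀ (i : Nat) (c : Int),
    hasUQLoop cs i c = c + (uq (if i = 0 then none else some (cs.getD (i - 1) ' ')) (cs.drop i) : Nat) := by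
  intro i
  induction hn : cs.length - i using Nat.strong_induction_on generalizing i with
  | _ n ih =>
    intro c
    rw [hasUQLoop]
    by_cases h : i < cs.length
    · rw [dif_pos h]
      have hget : PySem.List.pyGet? cs (i : Int) = some cs[i] := by
        simp [PySem.List.pyGet?_natCast, List.getElem?_eq_getElem h]
      rw [hget]
      have hdrop : cs.drop i = cs[i] :: cs.drop (i + 1) := (List.getElem_cons_drop h).symm
      have hrec := ih (cs.length - (i + 1)) (by omega) (i + 1) (by rfl)
      rw [hrec]
      have hprev : (if i + 1 = 0 then none else some (cs.getD (i + 1 - 1) ' ')) = some cs[i] := by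
        simp [List.getD, List.getElem?_eq_getElem h]
      rw [hprev, hdrop]
      simp only [uq]
      by_cases hi : i = 0
      · subst hi
        by_cases hq : cs[0] = '"' <;>
          simp [hget, hq, uq] <;> push_cast <;> omega
      · have hi1 : i - 1 < cs.length := by omega
        have hgetp : PySem.List.pyGet? cs ((i : Int) - 1) = some cs[i - 1] := by
          rw [show ((i : Int) - 1) = ((i - 1 : Nat) : Int) by omega]
          simp [PySem.List.pyGet?_natCast, List.getElem?_eq_getElem hi1]
        have hgd : cs[i - 1]? = some cs[i - 1] := List.getElem?_eq_getElem hi1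
        rw [hgetp]
        by_cases hq : cs[i] = '"' <;> by_cases hb : cs[i - 1] = '\\' <;>
          simp [hgd, hq, hb, hi, uq] <;> push_cast <;> omega
    · rw [dif_neg h]
      rw [List.drop_eq_nil_of_le (by omega)]
      simp [uq]

-- strip text = "" implies every character is whitespace
theorem all_space_of_strip_eq_nil (cs : List Char) (h : PySem.Chars.strip cs = []) :
    ∀ c ∈ cs, PySem.Chars.isspace c = true := by
  unfold PySem.Chars.strip PySem.Chars.rstrip PySem.Chars.lstrip at h
  have h2 : List.dropWhile PySem.Chars.isspace (List.dropWhile PySem.Chars.isspace cs).reverse = [] := by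
    simpa using h
  rw [List.dropWhile_eq_nil_iff] at h2
  intro c hc
  by_cases hmem : c ∈ List.dropWhile PySem.Chars.isspace cs
  · exact h2 c (by simpa using hmem)
  · have : c ∈ List.takeWhile PySem.Chars.isspace cs := by
      have := List.takeWhile_append_dropWhile (p := PySem.Chars.isspace) (l := cs)
      rw [← this] at hc
      rcases List.mem_append.mp hc with h | h
      · exact h
      · exact absurd h hmem
    exact List.mem_takeWhile_imp this

theorem fmod_two_ne_zero_iff (n : Int) (h0 : 0 ≤ n) : (Int.fmod n 2 ≠ 0) ↔ Int.fmod n 2 = 1 := by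
  have := Int.emod_emod_of_dvd n (dvd_refl 2)
  have h1 : Int.fmod n 2 = n % 2 := by
    rw [Int.fmod_eq_emod]
    simp
  rw [h1]
  omega

-- ===== VERDICT (by name: the statement is the Claim_ definition above) =====
theorem has_unbalanced_quotes_spec : Claim_equal_has_unbalanced_quotes := by
  intro text _dom
  unfold Spec_has_unbalanced_quotes has_unbalanced_quotes has_unbalanced_quotes_alt
  set cs := text.toList with hcs
  have hq : PySem.Str.count text "\"" = cs.count '"' := by
    rw [show PySem.Str.count text "\"" = PySem.Chars.count cs ['"'] from rfl,
      count_eq_mcount _ _ (by simp), mcount_quote]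
  have hesc : PySem.Str.count text "\\\"" = mcount ['\\', '"'] cs := by
    rw [show PySem.Str.count text "\\\"" = PySem.Chars.count cs ['\\', '"'] from rfl,
      count_eq_mcount _ _ (by simp)]
  have hmain := uq_add_mcount cs.length cs le_rfl none
  simp only [reduceCtorEq, false_and, if_false, add_zero] at hmain
  have hloop : hasUQLoop cs 0 0 = (uq none cs : Nat) := by
    rw [loop_eq_uq cs 0]; simp
  by_cases hguard : text == "" || PySem.Str.strip text == ""
  · rw [if_pos hguard]
    -- all characters are whitespace, so both counts are 0 and B returns false
    have hall : ∀ c ∈ cs, PySem.Chars.isspace c = true := by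
      rcases Bool.or_eq_true_iff.mp hguard with h | h
      · have : text = "" := by simpa using h
        subst this; simp [hcs]
      · apply all_space_of_strip_eq_nil
        have : PySem.Str.strip text = "" := by simpa using h
        have := congrArg String.toList this
        simpa [PySem.Str.strip] using this
    have hq0 : cs.count '"' = 0 := by
      rw [List.count_eq_zero]
      intro hmem
      have := hall _ hmem
      simp [PySem.Chars.isspace] at this
    have he0 : mcount ['\\', '"'] cs = 0 := by omega
    rw [hq, hesc, hq0, he0]
    simp [PySem.Int.mod]
  · rw [if_neg hguard]
    rw [hq, hesc, hloop]
    have hsub : (cs.count '"' : Int) - (mcount ['\\', '"'] cs : Int) = (uq none cs : Nat) := by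
      omega
    rw [hsub]
    simp only [PySem.Int.mod]
    rcases (fmod_two_ne_zero_iff ((uq none cs : Nat) : Int) (by positivity)) with h
    by_cases hz : Int.fmod ((uq none cs : Nat) : Int) 2 = 0
    · simp [hz]
    · simp [hz, h.mp hz]
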